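-- pv_equiv track=rewrite | github.com/NgaLy-lab/facemask-web | backend/model_handler.py | count_faces
-- ===== SOURCE A (Python) =====
-- def count_faces(result):
--     total = len(result)
--     mask=0
--     no_mask=0
--     incorrect=0
--     for e in result:
--         if e['label']==0:
--             no_mask+=1
--         elif (e['label']==1):
--             mask+=1
--         else:
--             incorrect+=1
--     return {'total': total,
--             'mask': mask,
--             'no_mask': no_mask,
--             'incorrect': incorrect}
-- ===== SOURCE B (Python) =====
-- def count_faces(result):
--     # staged passes: extract the labels once, then count each wanted label
--     # with list.count; 'incorrect' is derived by subtraction, no branching.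
--     labels = [e['label'] for e in result]
--     total = len(labels)
--     mask = labels.count(1)
--     no_mask = labels.count(0)
--     return {'total': total,
--             'mask': mask,
--             'no_mask': no_mask,
--             'incorrect': total - mask - no_mask}
-- ===== Notes on version B (the rewrite author's own statement) =====
-- stated objective: idiomatic
-- what changed: B replaces A's single branching loop with three accumulators by staged passes: it first projects the label list, then uses list.count(1) and list.count(0) for the two buckets and derives 'incorrect' arithmetically as total - mask - no_mask, so the if/elif/else chain and the per-element state disappear.
import Mathlib
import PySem

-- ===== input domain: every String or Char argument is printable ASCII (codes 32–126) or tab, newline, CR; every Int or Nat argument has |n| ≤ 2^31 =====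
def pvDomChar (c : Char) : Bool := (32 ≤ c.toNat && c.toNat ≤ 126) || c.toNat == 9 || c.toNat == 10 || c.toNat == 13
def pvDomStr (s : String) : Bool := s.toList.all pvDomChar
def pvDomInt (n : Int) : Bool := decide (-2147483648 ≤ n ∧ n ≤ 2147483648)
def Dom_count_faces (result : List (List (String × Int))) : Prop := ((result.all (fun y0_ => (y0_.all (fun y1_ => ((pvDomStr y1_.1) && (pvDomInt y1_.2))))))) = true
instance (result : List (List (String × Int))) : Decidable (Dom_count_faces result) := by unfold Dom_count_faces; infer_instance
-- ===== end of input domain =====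

-- B replaces A's single branching loop by staged passes: project the labels, count 1s and 0s
-- with list.count, derive 'incorrect' by subtraction (idiomatic rewrite, same cost).


-- shared helper: e['label'] on an insertion-ordered dict given as an association list (first match)
def getLabel? (e : List (String × Int)) : Option Int := (PySem.Dict.mk e).get? "label"

-- ===== PORT A =====
-- literal port of A: three accumulators (mask, no_mask, incorrect), if/elif/else per element;
-- a missing 'label' key raises KeyError in Python (excluded by Pre_), here the state is kept unchanged
def count_faces (result : List (List (String × Int))) : List (String × Int) :=
  let total : Int := result.length
  let s := result.foldl (fun (st : Int × Int × Int) e =>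
    match getLabel? e with
    | some l =>
        if l == 0 then (st.1, st.2.1 + 1, st.2.2)
        else if l == 1 then (st.1 + 1, st.2.1, st.2.2)
        else (st.1, st.2.1, st.2.2 + 1)
    | none => st) (0, 0, 0)
  [("total", total), ("mask", s.1), ("no_mask", s.2.1), ("incorrect", s.2.2)]

-- ===== PORT B =====
-- port of B: project the labels (KeyError inputs are excluded by Pre_; here they are skipped),
-- then count with list.count and derive 'incorrect' by subtraction
def count_faces_alt (result : List (List (String × Int))) : List (String × Int) :=
  let labels : List Int := result.filterMap getLabel?
  let total : Int := labels.length
  let mask : Int := PySem.List.count labels 1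
  let no_mask : Int := PySem.List.count labels 0
  [("total", total), ("mask", mask), ("no_mask", no_mask), ("incorrect", total - mask - no_mask)]

-- ===== PRECONDITION & SPEC =====
-- Pre_ excludes exactly the inputs where some element has no 'label' key: there Python A raises KeyError
def Pre_count_faces (result : List (List (String × Int))) : Prop :=
  ∀ e ∈ result, (getLabel? e).isSome = true
instance (result : List (List (String × Int))) : Decidable (Pre_count_faces result) := by unfold Pre_count_faces; infer_instance
def pvWitness_count_faces : (List (List (String × Int))) :=
  [[("label", 0)], [("label", 1)], [("x", 9), ("label", 5)]]
def Spec_count_faces (result : List (List (String × Int))) (out : List (String × Int)) : Prop := out = count_faces_alt result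
instance (result : List (List (String × Int))) (out : List (String × Int)) : Decidable (Spec_count_faces result out) := by unfold Spec_count_faces; infer_instance

-- ===== CLAIM =====
def Claim_equal_count_faces : Prop := ∀ (result : List (List (String × Int))), Dom_count_faces result → Pre_count_faces result → Spec_count_faces result (count_faces result)

-- ===== LEMMAS AND PROOFS =====

-- A's fold computed on the projected label list: mask/no_mask are counts, incorrect is the rest
lemma foldA_eq (result : List (List (String × Int))) (st : Int × Int × Int) :
    result.foldl (fun (st : Int × Int × Int) e =>
      match getLabel? e with
      | some l =>
          if l == 0 then (st.1, st.2.1 + 1, st.2.2)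
          else if l == 1 then (st.1 + 1, st.2.1, st.2.2)
          else (st.1, st.2.1, st.2.2 + 1)
      | none => st) st
    = (st.1 + ((result.filterMap getLabel?).count 1 : Int),
       st.2.1 + ((result.filterMap getLabel?).count 0 : Int),
       st.2.2 + ((result.filterMap getLabel?).length : Int)
         - ((result.filterMap getLabel?).count 0 : Int)
         - ((result.filterMap getLabel?).count 1 : Int)) := by
  induction result generalizing st with
  | nil => simp
  | cons e rest ih =>
    cases h : getLabel? e with
    | none =>
      simp only [List.foldl_cons, h, List.filterMap_cons, ih]
    | some l =>
      simp only [List.foldl_cons, h, List.filterMap_cons, ih]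
      by_cases h0 : l = 0
      · subst h0; simp; constructor <;> ring
      · by_cases h1 : l = 1
        · subst h1; simp; constructor <;> ring
        · simp only [beq_iff_eq, h0, h1, if_false, List.count_cons]
          simp
          ring

-- under Pre_ no element is skipped by the projection
lemma labels_length (result : List (List (String × Int))) (h : Pre_count_faces result) :
    (result.filterMap getLabel?).length = result.length := by
  induction result with
  | nil => rfl
  | cons e rest ih =>
    have he := h e (by simp)
    cases hh : getLabel? e with
    | none => rw [hh] at he; simp at he
    | some l =>
      simp only [List.filterMap_cons, hh, List.length_cons]
      rw [ih (fun x hx => h x (by simp [hx]))]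

-- ===== VERDICT =====
theorem count_faces_spec : Claim_equal_count_faces := by
  intro result _ hpre
  unfold Spec_count_faces count_faces count_faces_alt
  simp only [foldA_eq, PySem.List.count_eq]
  simp [labels_length result hpre]
  ring
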